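-- pv_equiv track=rewrite | github.com/sonichi/sutando | tests/call-log-scanner.test.py | detect_repeated_responses
-- ===== SOURCE A (Python) =====
-- def detect_repeated_responses(transcript):
--     issues = []
--     lines = [l.strip() for l in transcript.split('\n') if l.strip()]
--     for i in range(1, len(lines)):
--         if lines[i] == lines[i-1] and lines[i].startswith('Sutando:'):
--             text = lines[i][len('Sutando:'):].strip()[:80]
--             issues.append({"type": "duplicate_response", "text": text})
--     return issues
-- ===== SOURCE B (Python) =====
-- def detect_repeated_responses(transcript):
--     # Run-length grouping over consecutive equal lines instead of an index-based adjacent-pair loop.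
--     lines = [l.strip() for l in transcript.split('\n') if l.strip()]
--     issues = []
--     i = 0
--     n = len(lines)
--     while i < n:
--         j = i
--         while j < n and lines[j] == lines[i]:
--             j += 1
--         if lines[i].startswith('Sutando:'):
--             text = lines[i][len('Sutando:'):].strip()[:80]
--             issues.extend({"type": "duplicate_response", "text": text} for _ in range(j - i - 1))
--         i = j
--     return issues
-- ===== Notes on version B (the rewrite author's own statement) =====
-- stated objective: alternative
-- what changed: Replaces A's index-based adjacent-pair loop with run-length grouping: B scans maximal runs of consecutive equal lines and emits run_length-1 duplicate entries per 'Sutando:'-prefixed run.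
import Mathlib
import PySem

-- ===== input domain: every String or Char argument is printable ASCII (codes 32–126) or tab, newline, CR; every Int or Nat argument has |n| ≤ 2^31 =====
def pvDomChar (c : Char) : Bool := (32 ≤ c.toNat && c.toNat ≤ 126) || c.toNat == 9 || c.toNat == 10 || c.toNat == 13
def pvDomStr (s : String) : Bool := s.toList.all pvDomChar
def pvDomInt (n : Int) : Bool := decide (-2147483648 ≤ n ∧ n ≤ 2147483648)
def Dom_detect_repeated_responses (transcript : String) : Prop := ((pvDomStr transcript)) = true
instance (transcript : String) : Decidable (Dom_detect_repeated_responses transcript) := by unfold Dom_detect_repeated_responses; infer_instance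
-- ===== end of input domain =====

-- B replaces A's index-based adjacent-pair loop by run-length grouping of consecutive
-- equal lines (objective: alternative; same linear cost, same return value).

-- ===== PORT A =====
-- shared by both ports: both Pythons contain the identical comprehension
-- lines = [l.strip() for l in transcript.split('\n') if l.strip()]
def pvLines (transcript : String) : List String :=
  (((PySem.Str.split? transcript "\n").getD []).filter
      (fun l => PySem.Str.strip l ≠ "")).map PySem.Str.strip

-- text = line[len('Sutando:'):].strip()[:80]  (in both Pythons)
def pvText (l : String) : String :=
  PySem.Str.slice (PySem.Str.strip (PySem.Str.slice l (some 8) none)) none (some 80)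

-- {"type": "duplicate_response", "text": text}
def pvEntry (l : String) : List (String × String) :=
  [("type", "duplicate_response"), ("text", pvText l)]

def detect_repeated_responses (transcript : String) : List (List (String × String)) :=
  let lines := pvLines transcript
  (PySem.List.pyRange 1 (lines.length : Int) 1).foldl
    (fun issues i =>
      if PySem.List.pyGetD lines i "" = PySem.List.pyGetD lines (i - 1) "" ∧
         PySem.Str.startswith (PySem.List.pyGetD lines i "") "Sutando:" = true then
        issues ++ [pvEntry (PySem.List.pyGetD lines i "")]
      else issues) []

-- ===== PORT B =====
-- run-length grouping: for each maximal run of k equal lines headed by l,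
-- emit k-1 entries when l starts with 'Sutando:'
def pvRuns : List String → List (List (String × String))
  | [] => []
  | l :: rest =>
    let run := rest.takeWhile (fun x => x == l)
    let tail := rest.dropWhile (fun x => x == l)
    (if PySem.Str.startswith l "Sutando:" = true then
       List.replicate run.length (pvEntry l)
     else []) ++ pvRuns tail
termination_by ls => ls.length
decreasing_by
  exact Nat.lt_succ_of_le (List.length_dropWhile_le _ _)

def detect_repeated_responses_alt (transcript : String) : List (List (String × String)) :=
  pvRuns (pvLines transcript)

-- ===== PRECONDITION & SPEC =====
def Spec_detect_repeated_responses (transcript : String) (out : List (List (String × String))) : Prop := out = detect_repeated_responses_alt transcript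
instance (transcript : String) (out : List (List (String × String))) : Decidable (Spec_detect_repeated_responses transcript out) := by unfold Spec_detect_repeated_responses; infer_instance

-- ===== CLAIM (what is proved, stated in full; the proofs are below) =====
def Claim_equal_detect_repeated_responses : Prop := ∀ (transcript : String), Dom_detect_repeated_responses transcript → Spec_detect_repeated_responses transcript (detect_repeated_responses transcript)

-- ===== LEMMAS AND PROOFS =====

-- A's loop body expressed over the pair (previous line, current line)
def pvStep (acc : List (List (String × String))) (prev cur : String) :
    List (List (String × String)) :=
  if cur = prev ∧ PySem.Str.startswith cur "Sutando:" = true then acc ++ [pvEntry cur]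
  else acc

-- adjacent-pair recursion carrying the previous line
def pvPairs (prev : String) : List String → List (List (String × String))
  | [] => []
  | x :: r =>
    (if x = prev ∧ PySem.Str.startswith x "Sutando:" = true then [pvEntry x] else []) ++
      pvPairs x r

theorem pvStep_eq (acc : List (List (String × String))) (prev cur : String) :
    pvStep acc prev cur =
      acc ++ (if cur = prev ∧ PySem.Str.startswith cur "Sutando:" = true
              then [pvEntry cur] else []) := by
  unfold pvStep; split_ifs <;> simp

-- A's fold over indices 1..n-1 equals the fold over the adjacent pairs (zip ls ls.tail)
theorem pvMap_pairs (ls : List String) :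
    (PySem.List.pyRange 1 (ls.length : Int) 1).map
        (fun i => (PySem.List.pyGetD ls (i - 1) "", PySem.List.pyGetD ls i "")) =
      ls.zip ls.tail := by
  apply List.ext_getElem
  · simp [PySem.List.length_pyRange_one, List.length_zip, List.length_tail]
  · intro k h1 h2
    have hk : k < ls.length - 1 := by
      simpa [List.length_zip, List.length_tail] using h2
    have hr : k < (PySem.List.pyRange 1 (ls.length : Int)).length := by
      simp [PySem.List.length_pyRange_one]; omega
    simp only [List.getElem_map]
    rw [PySem.List.getElem_pyRange_one 1 (ls.length : Int) k hr]
    have hc1 : (1 : Int) + (k : Int) - 1 = ((k : Nat) : Int) := by ring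
    have hc2 : (1 : Int) + (k : Int) = ((k + 1 : Nat) : Int) := by push_cast; ring
    rw [hc1, hc2, PySem.List.pyGetD_natCast, PySem.List.pyGetD_natCast]
    rw [List.getD_eq_getElem ls "" (by omega), List.getD_eq_getElem ls "" (by omega)]
    simp [List.getElem_zip, List.getElem_tail]

-- fold of pvStep over the zip equals pvPairs
theorem pvFoldZip (r : List String) :
    ∀ (prev : String) (init : List (List (String × String))),
      ((prev :: r).zip r).foldl (fun acc p => pvStep acc p.1 p.2) init =
        init ++ pvPairs prev r := by
  induction r with
  | nil => intro prev init; simp [pvPairs]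
  | cons x r ih =>
    intro prev init
    simp only [List.zip_cons_cons, List.foldl_cons]
    rw [ih x, pvStep_eq, pvPairs]
    simp

-- pvPairs equals B's run-length grouping
theorem pvPairs_eq_runs (rest : List String) :
    ∀ (l : String), pvPairs l rest = pvRuns (l :: rest) := by
  induction rest with
  | nil => intro l; simp [pvPairs, pvRuns]
  | cons x r ih =>
    intro l
    by_cases hx : x = l
    · subst hx
      rw [pvPairs, ih x, pvRuns, pvRuns]
      simp only [List.takeWhile_cons, List.dropWhile_cons, beq_self_eq_true, if_true,
        List.length_cons]
      simp only [true_and]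
      split_ifs with hs
      · simp [List.replicate_succ]
      · simp
    · rw [pvPairs, ih x]
      conv_rhs => rw [pvRuns]
      have hb : (x == l) = false := by simp [hx]
      simp [hb, hx]

theorem pvRuns_main (ls : List String) :
    (PySem.List.pyRange 1 (ls.length : Int) 1).foldl
        (fun issues i =>
          if PySem.List.pyGetD ls i "" = PySem.List.pyGetD ls (i - 1) "" ∧
             PySem.Str.startswith (PySem.List.pyGetD ls i "") "Sutando:" = true then
            issues ++ [pvEntry (PySem.List.pyGetD ls i "")]
          else issues) [] = pvRuns ls := by
  have hf : (PySem.List.pyRange 1 (ls.length : Int) 1).foldl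
        (fun issues i =>
          if PySem.List.pyGetD ls i "" = PySem.List.pyGetD ls (i - 1) "" ∧
             PySem.Str.startswith (PySem.List.pyGetD ls i "") "Sutando:" = true then
            issues ++ [pvEntry (PySem.List.pyGetD ls i "")]
          else issues) [] =
      ((PySem.List.pyRange 1 (ls.length : Int) 1).map
          (fun i => (PySem.List.pyGetD ls (i - 1) "", PySem.List.pyGetD ls i ""))).foldl
        (fun acc p => pvStep acc p.1 p.2) [] := by
    rw [List.foldl_map]
    rfl
  rw [hf, pvMap_pairs]
  cases ls with
  | nil => simp [pvRuns]
  | cons l rest =>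
    have : (l :: rest).tail = rest := rfl
    rw [this, pvFoldZip rest l [], pvPairs_eq_runs rest l]
    simp

-- ===== VERDICT (by name: the statement is the Claim_ definition above) =====
theorem detect_repeated_responses_spec : Claim_equal_detect_repeated_responses := by
  intro transcript _
  unfold Spec_detect_repeated_responses detect_repeated_responses detect_repeated_responses_alt
  exact pvRuns_main (pvLines transcript)
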